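-- pv_equiv track=rewrite | github.com/alexandraback/datacollection | solutions_2449486_1/Python/KennethUlrich/main.py | solve
-- ===== SOURCE A (Python) =====
-- import itertools
--
-- def solve(v):
--     for i in range(2):
--         for row in v:
--             height = max(t[0] for t in row)
--             for grass in row:
--                 grass[1] = min(grass[1], height)
--         v = list(zip(*v))
--     return "YES" if all(t[0] == t[1] for t in itertools.chain.from_iterable(v)) else "NO"
-- ===== SOURCE B (Python) =====
-- def solve(v):
--     if not v:
--         return "YES"
--     rowmax = [max(c[0] for c in row) for row in v]
--     colmax = [max(row[j][0] for row in v) for j in range(len(v[0]))]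
--     return "YES" if all(
--         c[0] == min(c[1], rowmax[i], colmax[j])
--         for i, row in enumerate(v)
--         for j, c in enumerate(row)
--     ) else "NO"
-- ===== Notes on version B (the rewrite author's own statement) =====
-- stated objective: simpler
-- what changed: B replaces A's mutate-rows-then-transpose-twice double sweep with row-max and column-max tables computed once from the original heights and a single pure pass checking c[0] == min(c[1], rowmax[i], colmax[j]); A mutates cell[1] in place, B does not mutate its argument (return value proved equal).
-- outside the precondition, e.g. on solve([[[1, 1], [2, 2], [9, 9]], [[2, 2], [2, 2]]]): A returns 'YES', B raises IndexError
import Mathlib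
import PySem

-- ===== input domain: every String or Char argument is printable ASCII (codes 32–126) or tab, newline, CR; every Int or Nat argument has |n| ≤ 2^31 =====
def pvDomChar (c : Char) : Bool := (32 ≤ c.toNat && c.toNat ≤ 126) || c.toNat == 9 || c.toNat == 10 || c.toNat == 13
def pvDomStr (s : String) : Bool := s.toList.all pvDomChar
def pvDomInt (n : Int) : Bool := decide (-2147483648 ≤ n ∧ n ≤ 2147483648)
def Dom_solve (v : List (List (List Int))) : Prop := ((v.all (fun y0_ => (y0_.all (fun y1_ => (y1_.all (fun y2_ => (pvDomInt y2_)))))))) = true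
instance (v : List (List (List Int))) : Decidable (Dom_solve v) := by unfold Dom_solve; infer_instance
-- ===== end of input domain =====

-- B replaces A's mutate-rows/transpose/mutate-again two-sweep by row-max and column-max
-- tables and one pure pass checking c[0] == min(c[1], rowmax[i], colmax[j]); A mutates the
-- cells' second entries in place, B does not mutate the input (return value proved equal).

-- ===== PORT A =====
-- one pass of A's inner 'for row in v' loop: height = max(t[0] for t in row); grass[1] = min(grass[1], height)
-- (indices 0 and 1 are in range on every Pre_ input, so List.getD/List.set are exact for t[0]/grass[1] there)
def rowSweep (v : List (List (List Int))) : List (List (List Int)) :=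
  v.map (fun row =>
    let height : Int := (PySem.List.max? (row.map (fun t => t.getD 0 0)) (fun x => x)).getD 0
    row.map (fun grass => grass.set 1 (min (grass.getD 1 0) height)))

-- number of rows of zip(*v): 0 for v = [], else the minimum row length
def pyMinLen : List (List (List Int)) → Nat
  | [] => 0
  | r :: rs => rs.foldl (fun a row => min a row.length) r.length

-- list(zip(*v)) with tuples as lists: exact for every v (row j of the zip collects row.getD j
-- over all rows, and j < every row's length by definition of pyMinLen)
def pyZipStar (v : List (List (List Int))) : List (List (List Int)) :=
  (List.range (pyMinLen v)).map (fun j => v.map (fun row => row.getD j []))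

def solve (v : List (List (List Int))) : String :=
  let v1 := pyZipStar (rowSweep v)
  let v2 := pyZipStar (rowSweep v1)
  if v2.flatten.all (fun t => t.getD 0 0 == t.getD 1 0) then "YES" else "NO"

-- ===== PORT B =====
def solve_alt (v : List (List (List Int))) : String :=
  if v.isEmpty then "YES" else
    let rowmax : List Int :=
      v.map (fun row => (PySem.List.max? (row.map (fun c => c.getD 0 0)) (fun x => x)).getD 0)
    let n : Nat := (v.headD []).length
    let colmax : List Int :=
      (List.range n).map (fun j =>
        (PySem.List.max? (v.map (fun row => (row.getD j []).getD 0 0)) (fun x => x)).getD 0)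
    if (List.range v.length).all (fun i =>
        (List.range n).all (fun j =>
          ((v.getD i []).getD j []).getD 0 0 ==
            min (min (((v.getD i []).getD j []).getD 1 0) (rowmax.getD i 0)) (colmax.getD j 0)))
    then "YES" else "NO"

-- ===== PRECONDITION & SPEC =====
-- Pre_ restricts to the task's natural domain of rectangular grids of [height, cut] pairs:
-- A raises IndexError on a cell of length < 2 and ValueError on an empty row; ragged
-- (non-rectangular) grids are outside the natural domain (A's zip(*v) silently truncates them).
def Pre_solve (v : List (List (List Int))) : Prop :=
  ∀ r ∈ v, r.length = (v.headD []).length ∧ r ≠ [] ∧ ∀ c ∈ r, 2 ≤ c.length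
instance (v : List (List (List Int))) : Decidable (Pre_solve v) := by unfold Pre_solve; infer_instance
def pvWitness_solve : List (List (List Int)) := [[[1, 1], [2, 2]], [[2, 2], [2, 2]]]

def Spec_solve (v : List (List (List Int))) (out : String) : Prop := out = solve_alt v
instance (v : List (List (List Int))) (out : String) : Decidable (Spec_solve v out) := by unfold Spec_solve; infer_instance

-- ===== CLAIM (what is proved, stated in full; the proofs are below) =====
def Claim_equal_solve : Prop := ∀ (v : List (List (List Int))), Dom_solve v → Pre_solve v → Spec_solve v (solve v)

-- ===== LEMMAS AND PROOFS =====

theorem set1_getD0 (l : List Int) (x : Int) : (l.set 1 x).getD 0 0 = l.getD 0 0 := by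
  cases l with
  | nil => rfl
  | cons a t => cases t <;> rfl

theorem set1_getD1 (l : List Int) (x : Int) (h : 2 ≤ l.length) : (l.set 1 x).getD 1 0 = x := by
  match l, h with
  | a :: b :: t, _ => rfl

theorem foldl_min_const (rs : List (List (List Int))) (k : Nat) :
    ∀ a, (∀ r' ∈ rs, r'.length = k) → rs.foldl (fun a row => min a row.length) (min a k) = min a k := by
  induction rs with
  | nil => intro a _; rfl
  | cons r' rs' ih =>
    intro a h'
    have hr' : r'.length = k := h' r' (by simp)
    simp only [List.foldl_cons, hr', min_assoc, min_self]
    exact ih a (fun x hx => h' x (by simp [hx]))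

theorem pyMinLen_const (w : List (List (List Int))) (k : Nat) (hne : w ≠ [])
    (h : ∀ r ∈ w, r.length = k) : pyMinLen w = k := by
  cases w with
  | nil => exact absurd rfl hne
  | cons r rs =>
    have hr : r.length = k := h r (by simp)
    have h2 : ∀ r' ∈ rs, r'.length = k := fun x hx => h x (by simp [hx])
    simpa [pyMinLen, hr, min_self] using foldl_min_const rs k k h2

theorem zipStar_flatten_all (w : List (List (List Int))) (f : List Int → Bool) :
    (pyZipStar w).flatten.all f
      = (List.range (pyMinLen w)).all (fun j => w.all (fun row => f (row.getD j []))) := by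
  simp [pyZipStar, List.all_flatten, List.all_map, Function.comp_def]

theorem rowSweep_all (w : List (List (List Int))) (p : List (List Int) → Bool) :
    (rowSweep w).all p = w.all (fun row => p (row.map (fun grass =>
      grass.set 1 (min (grass.getD 1 0)
        ((PySem.List.max? (row.map (fun t => t.getD 0 0)) (fun x => x)).getD 0))))) := by
  simp [rowSweep, List.all_map, Function.comp_def]

theorem rowSweep_ne_nil (w : List (List (List Int))) (h : w ≠ []) : rowSweep w ≠ [] := by
  simp [rowSweep, h]

theorem all_range_eq (k : Nat) (p q : Nat → Bool) (h : ∀ i, i < k → p i = q i) :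
    (List.range k).all p = (List.range k).all q := by
  rw [Bool.eq_iff_iff, List.all_eq_true, List.all_eq_true]
  constructor <;> intro H i hi
  · rw [← h i (List.mem_range.mp hi)]; exact H i hi
  · rw [h i (List.mem_range.mp hi)]; exact H i hi

theorem solve_eq_alt (v : List (List (List Int))) (hPre : Pre_solve v) : solve v = solve_alt v := by
  by_cases hv : v = []
  · subst hv; rfl
  · have hlen : ∀ r ∈ v, r.length = (v.headD []).length := fun r hr => (hPre r hr).1
    have hcell : ∀ r ∈ v, ∀ c ∈ r, 2 ≤ c.length := fun r hr => (hPre r hr).2.2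
    have hnpos : 0 < (v.headD []).length := by
      obtain ⟨r0, rest, rfl⟩ := List.exists_cons_of_ne_nil hv
      have h1 := (hPre r0 (by simp)).2.1
      have h2 := hlen r0 (by simp)
      simp only [List.headD_cons] at h2 ⊢
      exact List.length_pos_of_ne_nil h1
    have hs1ne : rowSweep v ≠ [] := rowSweep_ne_nil v hv
    have hs1 : ∀ r ∈ rowSweep v, r.length = (v.headD []).length := by
      intro r hr
      simp only [rowSweep, List.mem_map] at hr
      obtain ⟨row, hrow, rfl⟩ := hr
      simp [hlen row hrow]
    have hmin1 : pyMinLen (rowSweep v) = (v.headD []).length :=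
      pyMinLen_const _ _ hs1ne hs1
    have hz1 : ∀ r ∈ pyZipStar (rowSweep v), r.length = v.length := by
      intro r hr
      simp only [pyZipStar, List.mem_map] at hr
      obtain ⟨j, hj, rfl⟩ := hr
      simp [rowSweep]
    have hz1ne : pyZipStar (rowSweep v) ≠ [] := by
      apply List.ne_nil_of_length_pos
      have : (pyZipStar (rowSweep v)).length = (v.headD []).length := by
        simp [pyZipStar, hmin1]
      omega
    have hs2ne : rowSweep (pyZipStar (rowSweep v)) ≠ [] := rowSweep_ne_nil _ hz1ne
    have hs2 : ∀ r ∈ rowSweep (pyZipStar (rowSweep v)), r.length = v.length := by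
      intro r hr
      simp only [rowSweep, List.mem_map] at hr
      obtain ⟨row, hrow, rfl⟩ := hr
      simp [hz1 row hrow]
    have hmin2 : pyMinLen (rowSweep (pyZipStar (rowSweep v))) = v.length :=
      pyMinLen_const _ _ hs2ne hs2
    simp only [solve, solve_alt, List.isEmpty_eq_false_iff.mpr hv, Bool.false_eq_true,
      if_false, zipStar_flatten_all, hmin2]
    congr 1
    rw [eq_iff_iff, ← Bool.eq_iff_iff]
    apply all_range_eq
    intro i hi
    rw [rowSweep_all]
    simp only [pyZipStar, List.all_map, Function.comp_def, hmin1]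
    apply all_range_eq
    intro j hj
    have hjr : ∀ k (hk : k < v.length), j < (v[k]'hk).length := by
      intro k hk
      rw [hlen _ (List.getElem_mem hk)]; exact hj
    have E1 : List.map (fun t => t.getD 0 0) (List.map (fun row => row.getD j []) (rowSweep v))
        = List.map (fun row => (row.getD j []).getD 0 0) v := by
      apply List.ext_getElem
      · simp [rowSweep]
      · intro k hk hk2
        have hkv : k < v.length := by simpa [rowSweep] using hk2
        simp only [List.getElem_map, rowSweep]
        rw [List.getD_eq_getElem (n := j) _ _ (by simp only [List.length_map]; exact hjr k hkv), List.getElem_map, set1_getD0,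
          List.getD_eq_getElem (n := j) _ _ (hjr k hkv)]
    rw [E1]
    have hilen : i < (List.map (fun grass =>
        grass.set 1 (min (grass.getD 1 0)
          ((PySem.List.max? (List.map (fun row => (row.getD j []).getD 0 0) v) fun x => x).getD 0)))
        (List.map (fun row => row.getD j []) (rowSweep v))).length := by
      simpa [rowSweep] using hi
    rw [List.getD_eq_getElem _ _ hilen]
    simp only [List.getElem_map]
    have hrs : (rowSweep v)[i]'(by simpa [rowSweep] using hi) =
        List.map (fun grass => grass.set 1 (min (grass.getD 1 0)
          ((PySem.List.max? (List.map (fun t => t.getD 0 0) (v[i]'hi)) fun x => x).getD 0))) (v[i]'hi) := by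
      simp only [rowSweep, List.getElem_map]
    rw [hrs, List.getD_eq_getElem (n := j) _ _ (by simp only [List.length_map]; exact hjr i hi), List.getElem_map]
    rw [List.getD_eq_getElem (n := i) v [] hi, List.getD_eq_getElem (n := j) _ _ (hjr i hi)]
    rw [List.getD_eq_getElem (n := i) _ 0 (by simp only [List.length_map]; exact hi), List.getElem_map]
    rw [List.getD_eq_getElem (n := j) _ 0 (by simp only [List.length_map, List.length_range]; exact hj), List.getElem_map, List.getElem_range]
    have hclen : 2 ≤ ((v[i]'hi)[j]'(hjr i hi)).length :=
      hcell _ (List.getElem_mem hi) _ (List.getElem_mem (hjr i hi))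
    rw [set1_getD0, set1_getD0, set1_getD1 _ _ (by simpa using hclen),
      set1_getD1 _ _ hclen]

-- ===== VERDICT (by name: the statement is the Claim_ definition above) =====
theorem solve_spec : Claim_equal_solve := by
  intro v _ hPre
  exact solve_eq_alt v hPre
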